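-- pv_equiv track=rewrite | github.com/AlagappanRa/Personal-Projects | symmetrical_concentric_diamond_matrices.py | make_symmetrical_matrix
-- ===== SOURCE A (Python) =====
-- def make_symmetrical_matrix(n):
--     first_row = [i for i in range(n)]
--     final = [first_row]
--     for row in range(n-1):
--         select_no = row + 1
--         new = [i for i in range(select_no + 1)][::-1] + [i for i in range(1, n-select_no)]
--         final.append(new)
--
--     return final
-- ===== SOURCE B (Python) =====
-- def make_symmetrical_matrix(n):
--     return [list(range(n))] + [[abs(i - j) for j in range(n)] for i in range(1, n)]
-- ===== Notes on version B (the rewrite author's own statement) =====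
-- stated objective: simpler
-- what changed: B computes every cell below the first row directly from its coordinates as abs(i-j) in one comprehension, instead of building each row by reversing range(select_no+1) and concatenating range(1,n-select_no) inside an append loop.
import Mathlib
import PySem

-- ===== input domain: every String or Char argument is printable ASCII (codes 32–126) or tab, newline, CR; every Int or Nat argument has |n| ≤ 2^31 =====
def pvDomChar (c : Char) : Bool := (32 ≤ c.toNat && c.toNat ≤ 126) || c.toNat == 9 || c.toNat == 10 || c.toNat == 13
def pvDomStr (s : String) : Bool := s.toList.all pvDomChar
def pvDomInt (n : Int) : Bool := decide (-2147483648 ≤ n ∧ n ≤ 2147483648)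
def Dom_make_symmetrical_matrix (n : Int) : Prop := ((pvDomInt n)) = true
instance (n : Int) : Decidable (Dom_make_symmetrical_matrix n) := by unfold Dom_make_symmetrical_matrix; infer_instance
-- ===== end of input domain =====

-- B computes every cell below the first row directly from its coordinates as |i - j| in one
-- comprehension, instead of A's per-row reverse-and-concatenate append loop (objective: simpler).

-- ===== PORT A =====
def make_symmetrical_matrix (n : Int) : List (List Int) :=
  let first_row := PySem.List.pyRange 0 n 1
  -- for row in range(n-1): final.append([i for i in range(select_no+1)][::-1] + [i for i in range(1, n-select_no)])
  -- (xs[::-1] is List.reverse — exact for a full reversing slice)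
  (PySem.List.pyRange 0 (n - 1) 1).foldl
    (fun final row =>
      let select_no := row + 1
      let new := (PySem.List.pyRange 0 (select_no + 1) 1).reverse ++
                 PySem.List.pyRange 1 (n - select_no) 1
      final ++ [new])
    [first_row]

-- ===== PORT B =====
def make_symmetrical_matrix_alt (n : Int) : List (List Int) :=
  [PySem.List.pyRange 0 n 1] ++
    (PySem.List.pyRange 1 n 1).map (fun i =>
      (PySem.List.pyRange 0 n 1).map (fun j => |i - j|))

-- ===== PRECONDITION & SPEC =====
def Spec_make_symmetrical_matrix (n : Int) (out : List (List Int)) : Prop := out = make_symmetrical_matrix_alt n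
instance (n : Int) (out : List (List Int)) : Decidable (Spec_make_symmetrical_matrix n out) := by unfold Spec_make_symmetrical_matrix; infer_instance

-- ===== CLAIM (what is proved, stated in full; the proofs are below) =====
def Claim_equal_make_symmetrical_matrix : Prop := ∀ (n : Int), Dom_make_symmetrical_matrix n → Spec_make_symmetrical_matrix n (make_symmetrical_matrix n)

-- ===== LEMMAS AND PROOFS =====

-- Row i of A (the reversed i..0 run followed by 1..n-i-1) is exactly the coordinate formula |i - j|.
lemma pv_row_eq (N i : Nat) (hi : i < N) :
    (PySem.List.pyRange 0 ((i : Int) + 1) 1).reverse ++ PySem.List.pyRange 1 ((N : Int) - (i : Int)) 1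
      = (List.range N).map (fun (j : Nat) => |(i : Int) - (j : Int)|) := by
  apply List.ext_getElem
  · simp only [List.length_append, List.length_reverse, PySem.List.length_pyRange_one,
      List.length_map, List.length_range]
    omega
  · intro j hj hj'
    simp only [List.length_append, List.length_reverse, PySem.List.length_pyRange_one] at hj
    simp only [List.length_map, List.length_range] at hj'
    simp only [List.getElem_map, List.getElem_range]
    by_cases hc : j < i + 1
    · rw [List.getElem_append_left (by
        simp only [List.length_reverse, PySem.List.length_pyRange_one]; omega)]
      rw [List.getElem_reverse, PySem.List.getElem_pyRange_one]
      have : |(i : Int) - (j : Int)| = (i : Int) - (j : Int) := abs_of_nonneg (by omega)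
      rw [this]
      simp only [PySem.List.length_pyRange_one]
      omega
    · rw [List.getElem_append_right (by
        simp only [List.length_reverse, PySem.List.length_pyRange_one]; omega)]
      rw [PySem.List.getElem_pyRange_one]
      have : |(i : Int) - (j : Int)| = (j : Int) - (i : Int) := by
        rw [abs_sub_comm]; exact abs_of_nonneg (by omega)
      rw [this]
      simp only [List.length_reverse, PySem.List.length_pyRange_one]
      omega

lemma pv_main (N : Nat) (hN : 1 ≤ N) :
    make_symmetrical_matrix (N : Int) = make_symmetrical_matrix_alt (N : Int) := by
  unfold make_symmetrical_matrix make_symmetrical_matrix_alt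
  rw [PySem.List.foldl_append_singleton_eq_map]
  have e1 : ((N : Int) - 1) = ((N - 1 : Nat) : Int) := by omega
  rw [e1]
  simp only [PySem.List.pyRange_zero_natCast, List.map_map]
  congr 1
  have e2 : PySem.List.pyRange 1 (N : Int) 1
      = (List.range (N - 1)).map (fun (k : Nat) => 1 + (k : Int)) := by
    rw [PySem.List.pyRange_one]
    have : ((N : Int) - 1).toNat = N - 1 := by omega
    rw [this]
  rw [e2, List.map_map]
  apply List.map_congr_left
  intro k hk
  simp only [List.mem_range] at hk
  simp only [Function.comp_apply]
  have hcast : (k : Int) + 1 = (((k + 1 : Nat)) : Int) := by omega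
  have hcast' : (1 : Int) + (k : Int) = (((k + 1 : Nat)) : Int) := by omega
  rw [hcast, hcast', pv_row_eq N (k + 1) (by omega)]
  simp [Function.comp]

lemma pv_nonpos (n : Int) (hn : n ≤ 0) :
    make_symmetrical_matrix n = make_symmetrical_matrix_alt n := by
  have h1 : PySem.List.pyRange 0 (n - 1) 1 = [] := by
    rw [PySem.List.pyRange_one]
    have : (n - 1 - 0).toNat = 0 := by omega
    rw [this, List.range_zero, List.map_nil]
  have h2 : PySem.List.pyRange 1 n 1 = [] := by
    rw [PySem.List.pyRange_one]
    have : (n - 1).toNat = 0 := by omega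
    rw [this, List.range_zero, List.map_nil]
  unfold make_symmetrical_matrix make_symmetrical_matrix_alt
  rw [h1, h2]
  rfl

-- ===== VERDICT (by name: the statement is the Claim_ definition above) =====
theorem make_symmetrical_matrix_spec : Claim_equal_make_symmetrical_matrix := by
  intro n _
  unfold Spec_make_symmetrical_matrix
  by_cases hn : n ≤ 0
  · exact pv_nonpos n hn
  · rw [Int.not_le] at hn
    obtain ⟨N, rfl⟩ : ∃ N : Nat, n = (N : Int) := ⟨n.toNat, (Int.toNat_of_nonneg hn.le).symm⟩
    exact pv_main N (by exact_mod_cast hn)
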